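-- pv_equiv track=rewrite | github.com/blucsigma05/tbm-apps-script | .github/scripts/grinder_select_issue.py | severity_rank
-- ===== SOURCE A (Python) =====
-- SEVERITY_PRIORITY = {
--     'severity:blocker': 0,
--     'severity:critical': 1,
--     'severity:major': 2,
--     'severity:minor': 3,
-- }
--
-- DEFAULT_SEVERITY_RANK = 99  # unlabeled goes last
--
-- def severity_rank(labels: list[dict]) -> int:
--     best = DEFAULT_SEVERITY_RANK
--     for lbl in labels:
--         name = (lbl.get('name') or '').lower()
--         rank = SEVERITY_PRIORITY.get(name)
--         if rank is not None and rank < best: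
--             best = rank
--     return best
-- ===== SOURCE B (Python) =====
-- SEVERITY_PRIORITY = {
--     'severity:blocker': 0,
--     'severity:critical': 1,
--     'severity:major': 2,
--     'severity:minor': 3,
-- }
--
-- DEFAULT_SEVERITY_RANK = 99  # unlabeled goes last
--
-- def severity_rank(labels: list[dict]) -> int:
--     names = {(lbl.get('name') or '').lower() for lbl in labels}
--     for level, rank in SEVERITY_PRIORITY.items():
--         if level in names:
--             return rank
--     return DEFAULT_SEVERITY_RANK
-- ===== Notes on version B (the rewrite author's own statement) =====
-- stated objective: alternative
-- what changed: Inverts the traversal: instead of scanning all labels while tracking a running minimum rank, B builds the set of normalized label names once, then walks the severity table in ascending rank order and returns the first level present (early exit), defaulting to 99.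
import Mathlib
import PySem

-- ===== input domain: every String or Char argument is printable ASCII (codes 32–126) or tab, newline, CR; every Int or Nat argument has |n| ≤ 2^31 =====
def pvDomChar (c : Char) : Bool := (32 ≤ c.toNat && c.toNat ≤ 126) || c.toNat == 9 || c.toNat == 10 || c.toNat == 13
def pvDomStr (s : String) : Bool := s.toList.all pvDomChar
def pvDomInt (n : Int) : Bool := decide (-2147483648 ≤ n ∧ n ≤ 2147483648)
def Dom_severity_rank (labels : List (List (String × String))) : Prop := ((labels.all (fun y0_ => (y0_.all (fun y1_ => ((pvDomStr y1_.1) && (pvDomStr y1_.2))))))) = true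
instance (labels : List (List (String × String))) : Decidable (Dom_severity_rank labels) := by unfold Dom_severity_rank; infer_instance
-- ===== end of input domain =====

-- B replaces A's running-minimum scan over the labels by a name set plus an early-exit walk
-- of the severity table in ascending rank order (alternative decomposition, same cost).

-- ===== PORT A =====
def SEVERITY_PRIORITY : PySem.Dict String Int :=
  PySem.Dict.mk [("severity:blocker", 0), ("severity:critical", 1), ("severity:major", 2), ("severity:minor", 3)]

def DEFAULT_SEVERITY_RANK : Int := 99

def severity_rank (labels : List (List (String × String))) : Int :=
  labels.foldl (fun best lbl =>
    let name := PySem.Str.lower (PySem.Dict.getD (PySem.Dict.mk lbl) "name" "")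
    match PySem.Dict.get? SEVERITY_PRIORITY name with
    | some rank => if rank < best then rank else best
    | none => best) DEFAULT_SEVERITY_RANK

-- ===== PORT B =====
-- the 'for level, rank in SEVERITY_PRIORITY.items(): if level in names: return rank' loop of Source B
def findRank (names : PySem.Set String) : List (String × Int) → Int
  | [] => DEFAULT_SEVERITY_RANK
  | (level, rank) :: rest => if PySem.Set.contains names level then rank else findRank names rest

def severity_rank_alt (labels : List (List (String × String))) : Int :=
  let names : PySem.Set String :=
    PySem.Set.ofList (labels.map (fun lbl => PySem.Str.lower (PySem.Dict.getD (PySem.Dict.mk lbl) "name" "")))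
  findRank names (PySem.Dict.items SEVERITY_PRIORITY)

-- ===== PRECONDITION & SPEC =====
def Spec_severity_rank (labels : List (List (String × String))) (out : Int) : Prop := out = severity_rank_alt labels
instance (labels : List (List (String × String))) (out : Int) : Decidable (Spec_severity_rank labels out) := by unfold Spec_severity_rank; infer_instance

-- ===== CLAIM (what is proved, stated in full; the proofs are below) =====
def Claim_equal_severity_rank : Prop := ∀ (labels : List (List (String × String))), Dom_severity_rank labels → Spec_severity_rank labels (severity_rank labels)

-- ===== LEMMAS AND PROOFS =====

-- normalized name of one label
def pvNm (lbl : List (String × String)) : String :=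
  PySem.Str.lower (PySem.Dict.getD (PySem.Dict.mk lbl) "name" "")

-- rank of one normalized name (99 = no severity label)
def pvR (s : String) : Int :=
  if s = "severity:blocker" then 0 else if s = "severity:critical" then 1
  else if s = "severity:major" then 2 else if s = "severity:minor" then 3 else 99

-- cascade over a list of normalized names
def pvCasc (ns : List String) : Int :=
  if "severity:blocker" ∈ ns then 0 else if "severity:critical" ∈ ns then 1
  else if "severity:major" ∈ ns then 2 else if "severity:minor" ∈ ns then 3 else 99

theorem pvCasc_bounds (ns : List String) : 0 ≤ pvCasc ns ∧ pvCasc ns ≤ 99 := by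
  unfold pvCasc; split_ifs <;> omega

theorem pvR_bounds (s : String) : 0 ≤ pvR s ∧ pvR s ≤ 99 := by
  unfold pvR; split_ifs <;> omega

theorem pvCasc_cons (s : String) (ns : List String) :
    pvCasc (s :: ns) = min (pvR s) (pvCasc ns) := by
  unfold pvCasc pvR
  simp only [List.mem_cons]
  split_ifs <;> simp_all

theorem stepA_eq (b : Int) (hb : b ≤ 99) (lbl : List (String × String)) :
    (match PySem.Dict.get? SEVERITY_PRIORITY (pvNm lbl) with
      | some rank => if rank < b then rank else b
      | none => b) = min b (pvR (pvNm lbl)) := by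
  unfold pvR
  set s := pvNm lbl with hs
  by_cases h0 : s = "severity:blocker"
  · rw [h0]; simp [SEVERITY_PRIORITY, PySem.Dict.get?]; split_ifs <;> omega
  have b0 : ("severity:blocker" == s) = false := beq_eq_false_iff_ne.mpr (Ne.symm h0)
  by_cases h1 : s = "severity:critical"
  · rw [h1]; simp [SEVERITY_PRIORITY, PySem.Dict.get?]; split_ifs <;> omega
  have b1 : ("severity:critical" == s) = false := beq_eq_false_iff_ne.mpr (Ne.symm h1)
  by_cases h2 : s = "severity:major"
  · rw [h2]; simp [SEVERITY_PRIORITY, PySem.Dict.get?]; split_ifs <;> omega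
  have b2 : ("severity:major" == s) = false := beq_eq_false_iff_ne.mpr (Ne.symm h2)
  by_cases h3 : s = "severity:minor"
  · rw [h3]; simp [SEVERITY_PRIORITY, PySem.Dict.get?]; split_ifs <;> omega
  have b3 : ("severity:minor" == s) = false := beq_eq_false_iff_ne.mpr (Ne.symm h3)
  simp [SEVERITY_PRIORITY, PySem.Dict.get?, List.find?, b0, b1, b2, b3, h0, h1, h2, h3]
  omega

theorem foldA_eq (labels : List (List (String × String))) (b : Int) (hb : b ≤ 99) :
    labels.foldl (fun best lbl =>
      let name := PySem.Str.lower (PySem.Dict.getD (PySem.Dict.mk lbl) "name" "")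
      match PySem.Dict.get? SEVERITY_PRIORITY name with
      | some rank => if rank < best then rank else best
      | none => best) b = min b (pvCasc (labels.map pvNm)) := by
  induction labels generalizing b with
  | nil =>
      simp only [List.foldl_nil, List.map_nil]
      have h99 : pvCasc [] = 99 := by simp [pvCasc]
      rw [h99]; omega
  | cons lbl rest ih =>
      simp only [List.foldl_cons, List.map_cons]
      rw [show (let name := PySem.Str.lower (PySem.Dict.getD (PySem.Dict.mk lbl) "name" "")
            match PySem.Dict.get? SEVERITY_PRIORITY name with
            | some rank => if rank < b then rank else b
            | none => b) = min b (pvR (pvNm lbl)) from stepA_eq b hb lbl]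
      rw [ih (min b (pvR (pvNm lbl))) (by have := pvR_bounds (pvNm lbl); omega)]
      rw [pvCasc_cons]
      omega

theorem altB_eq (labels : List (List (String × String))) :
    severity_rank_alt labels = pvCasc (labels.map pvNm) := by
  unfold severity_rank_alt pvCasc pvNm
  simp [findRank, SEVERITY_PRIORITY, PySem.Set.mem_ofList, DEFAULT_SEVERITY_RANK]

-- ===== VERDICT (by name: the statement is the Claim_ definition above) =====
theorem severity_rank_spec : Claim_equal_severity_rank := by
  intro labels _
  unfold Spec_severity_rank severity_rank
  rw [foldA_eq labels DEFAULT_SEVERITY_RANK (by unfold DEFAULT_SEVERITY_RANK; omega), altB_eq]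
  have := pvCasc_bounds (labels.map pvNm)
  unfold DEFAULT_SEVERITY_RANK
  omega
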